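-- pv_equiv track=rewrite | github.com/user-richardmantik/PYnative_Answers | PYnative/python-numbers-programming/automorphic_numbers.py | automorphic_numbers
-- ===== SOURCE A (Python) =====
-- def automorphic_numbers(power):
--     automorphic_numbers = list()
--
--     top = 0
--     n = 5
--     base = 10
--     k = 1
--     for i in range(1, power+1):
--         size = 2**i
--         n = (3*n**2 - 2*n**3) % (base**size)
--         for j in range(k, size+1):
--             m5 = n % (base**j)
--             m6 = base**j + 1 - m5
--             _, middle, bigger  = sorted([top, m5, m6])
--             if middle > top:
--                 automorphic_numbers.append(middle)
--             automorphic_numbers.append(bigger)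
--             top = bigger
--         k = size + 1
--
--     return automorphic_numbers
-- ===== SOURCE B (Python) =====
-- def automorphic_numbers(power):
--     result = []
--     if power < 1:
--         return result
--     top = 0
--     x = 5  # the automorphic root ending in 5, currently with j digits
--     for j in range(1, 2 ** power + 1):
--         m6 = 10 ** j + 1 - x
--         small, big = min(x, m6), max(x, m6)
--         if small > top:
--             result.append(small)
--         result.append(big)
--         top = big
--         x = x * x % 10 ** (j + 1)  # lift the ...5 root by one more digit
--     return result
-- ===== Notes on version B (the rewrite author's own statement) =====
-- stated objective: simpler
-- what changed: Replaces A's nested precision-doubling loop (cubic Newton step modulo a growing power of ten, plus k/size bookkeeping and a sort of a three-element list per step) by one flat per-digit pass that lifts the trailing-five automorphic root one digit per step by squaring it modulo the next power of ten, emitting the min/max pair directly.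
import Mathlib
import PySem

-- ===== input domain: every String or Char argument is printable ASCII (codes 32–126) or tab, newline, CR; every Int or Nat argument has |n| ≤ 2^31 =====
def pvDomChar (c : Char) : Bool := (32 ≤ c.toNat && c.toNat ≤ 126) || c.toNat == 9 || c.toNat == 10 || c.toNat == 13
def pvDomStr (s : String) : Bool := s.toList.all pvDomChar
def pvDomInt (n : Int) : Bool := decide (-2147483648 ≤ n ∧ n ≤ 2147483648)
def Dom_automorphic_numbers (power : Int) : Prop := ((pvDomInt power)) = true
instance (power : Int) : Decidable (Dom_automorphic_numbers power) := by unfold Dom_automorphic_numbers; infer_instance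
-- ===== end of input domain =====

-- B replaces A's nested precision-doubling loop (n = (3n^2-2n^3) mod 10^(2^i) plus k/size
-- bookkeeping and a 3-element sort per step) by one flat pass that lifts the ...5 automorphic
-- root one digit per step (x = x*x mod 10^(j+1)) and emits the min/max pair directly (simpler).

-- ===== PORT A =====
-- inner loop body: j-th step, n fixed (m5/m6, 3-element sort, conditional append)
def pvAinner (n : Int) (st : List Int × Int) (j : Int) : List Int × Int :=
  let m5 := PySem.Int.mod n (10 ^ j.toNat)
  let m6 := 10 ^ j.toNat + 1 - m5
  match PySem.List.sorted [st.2, m5, m6] (fun x => x) false with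
  | [_, middle, bigger] => (st.1 ++ (if middle > st.2 then [middle] else []) ++ [bigger], bigger)
  | _ => st   -- unreachable: sorted of a 3-element list has 3 elements

-- outer loop body; state is (acc, top, n, k)
def pvAouter (st : List Int × Int × Int × Int) (i : Int) : List Int × Int × Int × Int :=
  let size : Int := 2 ^ i.toNat
  let n := PySem.Int.mod (3 * st.2.2.1 ^ 2 - 2 * st.2.2.1 ^ 3) (10 ^ size.toNat)
  let inner := (PySem.List.pyRange st.2.2.2 (size + 1) 1).foldl (pvAinner n) (st.1, st.2.1)
  (inner.1, inner.2, n, size + 1)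

def automorphic_numbers (power : Int) : List Int :=
  ((PySem.List.pyRange 1 (power + 1) 1).foldl pvAouter ([], 0, 5, 1)).1

-- ===== PORT B =====
-- loop body of Source B; state is (result, top, x)
def pvBstep (st : List Int × Int × Int) (j : Int) : List Int × Int × Int :=
  let m6 : Int := 10 ^ j.toNat + 1 - st.2.2
  let small := min st.2.2 m6
  let big := max st.2.2 m6
  (st.1 ++ (if small > st.2.1 then [small] else []) ++ [big], big,
    PySem.Int.mod (st.2.2 * st.2.2) (10 ^ (j + 1).toNat))

def automorphic_numbers_alt (power : Int) : List Int :=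
  if power < 1 then []
  else ((PySem.List.pyRange 1 ((2 : Int) ^ power.toNat + 1) 1).foldl pvBstep ([], 0, 5)).1

-- ===== PRECONDITION & SPEC =====
def Spec_automorphic_numbers (power : Int) (out : List Int) : Prop := out = automorphic_numbers_alt power
instance (power : Int) (out : List Int) : Decidable (Spec_automorphic_numbers power out) := by unfold Spec_automorphic_numbers; infer_instance

-- ===== CLAIM (what is proved, stated in full; the proofs are below) =====
def Claim_equal_automorphic_numbers : Prop := ∀ (power : Int), Dom_automorphic_numbers power → Spec_automorphic_numbers power (automorphic_numbers power)

-- ===== LEMMAS AND PROOFS =====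

-- the canonical automorphic root ending in 5: pvX j has j+1 digits
def pvX : ℕ → ℤ
  | 0 => 5
  | j + 1 => (pvX j * pvX j) % 10 ^ (j + 2)

-- one emission step shared by both programs (state = (output so far, top))
def pvEmit (st : List ℤ × ℤ) (m5 m6 : ℤ) : List ℤ × ℤ :=
  (st.1 ++ (if min m5 m6 > st.2 then [min m5 m6] else []) ++ [max m5 m6], max m5 m6)

-- reference run after n levels
def pvRef : ℕ → List ℤ × ℤ
  | 0 => ([], 0)
  | n + 1 => pvEmit (pvRef n) (pvX n) (10 ^ (n + 1) + 1 - pvX n)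

-- A's n after i outer iterations
def pvN : ℕ → ℤ
  | 0 => 5
  | i + 1 => (3 * pvN i ^ 2 - 2 * pvN i ^ 3) % 10 ^ (2 ^ (i + 1))

lemma pv_fmod_eq (a b : ℤ) (h : 0 ≤ b) : PySem.Int.mod a b = a % b := by
  simp [PySem.Int.mod, Int.fmod_eq_emod, h]

lemma pv_dvd_emod_sub {d n a c : ℤ} (hdn : d ∣ n) (h : d ∣ a - c) : d ∣ a % n - c := by
  rw [Int.emod_def]
  have h2 : d ∣ n * (a / n) := hdn.mul_right _
  have := h.sub h2
  convert this using 1; ring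

lemma pv5_dvd_10 (m : ℕ) : (5:ℤ) ^ m ∣ 10 ^ m :=
  ⟨2 ^ m, by rw [← mul_pow]; norm_num⟩

lemma pv2_dvd_10 (m : ℕ) : (2:ℤ) ^ m ∣ 10 ^ m :=
  ⟨5 ^ m, by rw [← mul_pow]; norm_num⟩

lemma pvX_bounds (j : ℕ) : 0 ≤ pvX j ∧ pvX j < 10 ^ (j + 1) := by
  cases j with
  | zero => norm_num [pvX]
  | succ j =>
    have hpos : (0:ℤ) < 10 ^ (j + 2) := by positivity
    exact ⟨Int.emod_nonneg _ (by positivity), Int.emod_lt_of_pos _ hpos⟩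

lemma pvX_dvd5 (j : ℕ) : (5:ℤ) ^ (j + 1) ∣ pvX j := by
  induction j with
  | zero => norm_num [pvX]
  | succ j ih =>
    have hdn : ((5:ℤ) ^ (j + 2)) ∣ 10 ^ (j + 2) := pv5_dvd_10 _
    have hsq : (5:ℤ) ^ (j + 2) ∣ pvX j * pvX j := by
      have := mul_dvd_mul ih ih
      rw [← pow_add] at this
      exact dvd_trans (pow_dvd_pow 5 (by omega)) this
    have := pv_dvd_emod_sub (c := 0) hdn (by simpa using hsq)
    simpa [pvX] using this

lemma pvX_dvd2 (j : ℕ) : (2:ℤ) ^ (j + 1) ∣ pvX j - 1 := by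
  induction j with
  | zero => norm_num [pvX]
  | succ j ih =>
    have hdn : ((2:ℤ) ^ (j + 2)) ∣ 10 ^ (j + 2) := by
      have : (10:ℤ) ^ (j+2) = 2 ^ (j+2) * 5 ^ (j+2) := by rw [← mul_pow]; norm_num
      rw [this]; exact Dvd.intro _ rfl
    have h2 : (2:ℤ) ∣ pvX j + 1 := by
      have : (2:ℤ) ∣ pvX j - 1 := dvd_trans (dvd_pow_self 2 (by omega)) ih
      omega
    have hsq : (2:ℤ) ^ (j + 2) ∣ pvX j * pvX j - 1 := by
      have : pvX j * pvX j - 1 = (pvX j - 1) * (pvX j + 1) := by ring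
      rw [this, pow_succ]
      exact mul_dvd_mul ih h2
    have := pv_dvd_emod_sub (c := 1) hdn hsq
    simpa [pvX] using this

lemma pvN_dvd5 (i : ℕ) : (5:ℤ) ^ (2 ^ i) ∣ pvN i := by
  induction i with
  | zero => norm_num [pvN]
  | succ i ih =>
    have hdn : ((5:ℤ) ^ (2 ^ (i + 1))) ∣ 10 ^ (2 ^ (i + 1)) := pv5_dvd_10 _
    have hsq : (5:ℤ) ^ (2 ^ (i + 1)) ∣ 3 * pvN i ^ 2 - 2 * pvN i ^ 3 := by
      have hkey : 3 * pvN i ^ 2 - 2 * pvN i ^ 3 = (pvN i * pvN i) * (3 - 2 * pvN i) := by ring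
      have hsq2 : (5:ℤ) ^ (2 ^ (i + 1)) ∣ pvN i * pvN i := by
        have h := mul_dvd_mul ih ih
        rw [← pow_add] at h
        rwa [show 2 ^ i + 2 ^ i = 2 ^ (i + 1) from by omega] at h
      rw [hkey]; exact hsq2.mul_right _
    have := pv_dvd_emod_sub (c := 0) hdn (by simpa using hsq)
    simpa [pvN] using this

lemma pvN_dvd2 (i : ℕ) : (2:ℤ) ^ (2 ^ i) ∣ pvN i - 1 := by
  induction i with
  | zero => norm_num [pvN]
  | succ i ih =>
    have hdn : ((2:ℤ) ^ (2 ^ (i + 1))) ∣ 10 ^ (2 ^ (i + 1)) := by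
      have : (10:ℤ) ^ (2^(i+1)) = 2 ^ (2^(i+1)) * 5 ^ (2^(i+1)) := by rw [← mul_pow]; norm_num
      rw [this]; exact Dvd.intro _ rfl
    have hsq : (2:ℤ) ^ (2 ^ (i + 1)) ∣ 3 * pvN i ^ 2 - 2 * pvN i ^ 3 - 1 := by
      have hkey : 3 * pvN i ^ 2 - 2 * pvN i ^ 3 - 1
          = ((pvN i - 1) * (pvN i - 1)) * (-(2 * pvN i + 1)) := by ring
      have hsq2 : (2:ℤ) ^ (2 ^ (i + 1)) ∣ (pvN i - 1) * (pvN i - 1) := by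
        have h := mul_dvd_mul ih ih
        rw [← pow_add] at h
        rwa [show 2 ^ i + 2 ^ i = 2 ^ (i + 1) from by omega] at h
      rw [hkey]; exact hsq2.mul_right _
    have := pv_dvd_emod_sub (c := 1) hdn hsq
    simpa [pvN] using this

lemma pv_unique (m : ℕ) (a b : ℤ) (ha0 : 0 ≤ a) (ha1 : a < 10 ^ m) (hb0 : 0 ≤ b) (hb1 : b < 10 ^ m)
    (ha5 : (5:ℤ) ^ m ∣ a) (hb5 : (5:ℤ) ^ m ∣ b)
    (ha2 : (2:ℤ) ^ m ∣ a - 1) (hb2 : (2:ℤ) ^ m ∣ b - 1) : a = b := by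
  have h5 : (5:ℤ) ^ m ∣ a - b := dvd_sub ha5 hb5
  have h2 : (2:ℤ) ^ m ∣ a - b := by
    have := dvd_sub ha2 hb2
    simpa using this
  have hco : IsCoprime ((2:ℤ) ^ m) ((5:ℤ) ^ m) := by
    apply IsCoprime.pow
    rw [Int.isCoprime_iff_gcd_eq_one]; decide
  have h10 : ((10:ℤ) ^ m) ∣ a - b := by
    have := hco.mul_dvd h2 h5
    rwa [show (2:ℤ) ^ m * 5 ^ m = 10 ^ m by rw [← mul_pow]; norm_num] at this
  have habs : |a - b| < 10 ^ m := by rw [abs_lt]; omega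
  have : a - b = 0 := Int.eq_zero_of_abs_lt_dvd h10 habs
  omega

lemma pvN_mod (i j : ℕ) (hj : j + 1 ≤ 2 ^ i) : pvN i % 10 ^ (j + 1) = pvX j := by
  have hpos : (0:ℤ) < 10 ^ (j + 1) := by positivity
  apply pv_unique (j + 1)
  · exact Int.emod_nonneg _ (by positivity)
  · exact Int.emod_lt_of_pos _ hpos
  · exact (pvX_bounds j).1
  · exact (pvX_bounds j).2
  · have h5n : (5:ℤ) ^ (j + 1) ∣ pvN i := dvd_trans (pow_dvd_pow 5 hj) (pvN_dvd5 i)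
    have hdn : ((5:ℤ) ^ (j + 1)) ∣ 10 ^ (j + 1) := pv5_dvd_10 _
    have := pv_dvd_emod_sub (c := 0) hdn (by simpa using h5n)
    simpa using this
  · exact pvX_dvd5 j
  · have h2n : (2:ℤ) ^ (j + 1) ∣ pvN i - 1 := dvd_trans (pow_dvd_pow 2 hj) (pvN_dvd2 i)
    have hdn : ((2:ℤ) ^ (j + 1)) ∣ 10 ^ (j + 1) := pv2_dvd_10 _
    exact pv_dvd_emod_sub (c := 1) hdn h2n
  · exact pvX_dvd2 j

lemma pvX_pos (j : ℕ) : 1 ≤ pvX j := by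
  have h0 := (pvX_bounds j).1
  have h2 := pvX_dvd2 j
  by_contra h
  have hx : pvX j = 0 := by omega
  rw [hx] at h2
  have : ((2:ℤ) ^ (j + 1)) ∣ 1 := dvd_neg.mp (by simpa using h2)
  have hle : (2:ℤ) ^ (j + 1) ≤ 1 := Int.le_of_dvd one_pos this
  have : (2:ℤ) ≤ 2 ^ (j + 1) := by
    calc (2:ℤ) = 2 ^ 1 := by norm_num
    _ ≤ 2 ^ (j + 1) := pow_le_pow_right₀ (by norm_num) (by omega)
  omega

lemma pvRef_top (n : ℕ) : 0 ≤ (pvRef n).2 ∧ (pvRef n).2 ≤ 10 ^ n := by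
  cases n with
  | zero => norm_num [pvRef]
  | succ n =>
    have h1 := pvX_pos n
    have h2 := (pvX_bounds n).2
    have hp : (0:ℤ) < 10 ^ (n + 1) := by positivity
    simp only [pvRef, pvEmit]
    constructor <;> omega

-- insertion-sort characterisation of sorted on a 3-element list
lemma pv_sorted3 (t a b : Int) :
    PySem.List.sorted [t, a, b] (fun x : Int => x) false
      = if a < t then (if b < a then [b, a, t] else if b < t then [a, b, t] else [a, t, b])
        else (if b < t then [b, t, a] else if b < a then [t, b, a] else [t, a, b]) := by
  simp only [PySem.List.sorted, List.foldl, PySem.List.insertBy]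
  repeat' split
  all_goals simp only [PySem.List.insertBy]
  all_goals repeat' split
  all_goals simp_all
  all_goals omega

-- the sorted-based emission of A equals the min/max emission, provided top < max
lemma pv_emit_eq (t m5 m6 : ℤ) (h : t < max m5 m6) (acc : List ℤ) :
    (match PySem.List.sorted [t, m5, m6] (fun x : ℤ => x) false with
     | [_, middle, bigger] => (acc ++ (if middle > t then [middle] else []) ++ [bigger], bigger)
     | _ => (acc, t))
    = (acc ++ (if min m5 m6 > t then [min m5 m6] else []) ++ [max m5 m6], max m5 m6) := by
  rcases le_total m5 m6 with hc | hc
  · rw [min_eq_left hc, max_eq_right hc]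
    rw [pv_sorted3]
    split_ifs <;> first
      | (exfalso; omega)
      | (dsimp only; split_ifs <;> first | rfl | (exfalso; omega))
  · rw [min_eq_right hc, max_eq_left hc]
    rw [pv_sorted3]
    split_ifs <;> first
      | (exfalso; omega)
      | (dsimp only; split_ifs <;> first
          | rfl
          | (exfalso; omega)
          | (rw [show m6 = m5 from by omega]))

-- A's inner step agrees with the emission step of the reference run
lemma pvAinner_eq (i j : ℕ) (hj : j + 1 ≤ 2 ^ i) (st : List ℤ × ℤ)
    (htop : 0 ≤ st.2 ∧ st.2 ≤ 10 ^ j) :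
    pvAinner (pvN i) st ((j : ℤ) + 1) = pvEmit st (pvX j) (10 ^ (j + 1) + 1 - pvX j) := by
  obtain ⟨st1, st2⟩ := st
  simp only at htop
  have hcast : ((j : ℤ) + 1).toNat = j + 1 := by omega
  have hpos : (0:ℤ) ≤ 10 ^ (j + 1) := by positivity
  have hm5 : PySem.Int.mod (pvN i) (10 ^ (j + 1)) = pvX j := by
    rw [pv_fmod_eq _ _ hpos]; exact pvN_mod i j hj
  have hx1 : 1 ≤ pvX j := pvX_pos j
  have hx2 : pvX j < 10 ^ (j + 1) := (pvX_bounds j).2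
  have h10 : (10:ℤ) ^ (j + 1) = 10 * 10 ^ j := by ring
  have hmax : st2 < max (pvX j) (10 ^ (j + 1) + 1 - pvX j) := by
    rcases le_total (pvX j) (10 ^ (j + 1) + 1 - pvX j) with hc | hc
    · rw [max_eq_right hc]; omega
    · rw [max_eq_left hc]; omega
  simp only [pvAinner, hcast, hm5, pvEmit]
  exact pv_emit_eq st2 (pvX j) (10 ^ (j + 1) + 1 - pvX j) hmax st1

-- running A's inner loop from level k0 for cnt more levels follows the reference run
lemma pvA_inner_fold (i cnt : ℕ) : ∀ (k0 : ℕ), k0 + cnt ≤ 2 ^ i →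
    (PySem.List.pyRange ((k0 + 1 : ℕ) : ℤ) ((k0 + 1 + cnt : ℕ) : ℤ) 1).foldl
        (pvAinner (pvN i)) (pvRef k0)
      = pvRef (k0 + cnt) := by
  induction cnt with
  | zero =>
    intro k0 _
    rw [PySem.List.pyRange_one_eq_nil (by omega)]
    simp
  | succ cnt ih =>
    intro k0 hle
    have hsplit : ((k0 + 1 + (cnt + 1) : ℕ) : ℤ) = ((k0 + 1 + cnt : ℕ) : ℤ) + 1 := by
      push_cast; ring
    rw [hsplit, PySem.List.pyRange_one_succ_right (by push_cast; omega), List.foldl_append]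
    rw [ih k0 (by omega)]
    simp only [List.foldl]
    have : ((k0 + 1 + cnt : ℕ) : ℤ) = (((k0 + cnt : ℕ) : ℤ) + 1) := by push_cast; ring
    rw [this, pvAinner_eq i (k0 + cnt) (by omega) _ (pvRef_top (k0 + cnt))]
    rw [show k0 + (cnt + 1) = (k0 + cnt) + 1 from by omega]
    rfl

-- levels completed after p outer iterations
def pvE (p : ℕ) : ℕ := if p = 0 then 0 else 2 ^ p

lemma pvA_outer_fold (p : ℕ) :
    (PySem.List.pyRange 1 ((p : ℤ) + 1) 1).foldl pvAouter ([], 0, 5, 1)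
      = ((pvRef (pvE p)).1, (pvRef (pvE p)).2, pvN p, (pvE p : ℤ) + 1) := by
  induction p with
  | zero =>
    rw [PySem.List.pyRange_one_eq_nil (by omega)]
    simp [pvE, pvRef, pvN]
  | succ p ih =>
    rw [show ((p + 1 : ℕ) : ℤ) + 1 = ((p : ℤ) + 1) + 1 by push_cast; ring,
      PySem.List.pyRange_one_succ_right (by omega), List.foldl_append, ih]
    simp only [List.foldl]
    -- evaluate pvAouter at i = p + 1
    have hi : ((p : ℤ) + 1).toNat = p + 1 := by omega
    have hsz : ((2:ℤ) ^ (p + 1)).toNat = 2 ^ (p + 1) := by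
      rw [show (2:ℤ) ^ (p + 1) = ((2 ^ (p + 1) : ℕ) : ℤ) by push_cast; ring, Int.toNat_natCast]
    have hn : PySem.Int.mod (3 * pvN p ^ 2 - 2 * pvN p ^ 3) (10 ^ 2 ^ (p + 1)) = pvN (p + 1) := by
      rw [pv_fmod_eq _ _ (by positivity)]; rfl
    simp only [pvAouter, hi, hsz, hn]
    have hle : pvE p ≤ 2 ^ (p + 1) := by
      simp only [pvE]; split <;> [omega; exact Nat.pow_le_pow_right (by norm_num) (by omega)]
    have hE : pvE p + (2 ^ (p + 1) - pvE p) = 2 ^ (p + 1) := by omega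
    rw [show ((pvE p : ℤ) + 1) = ((pvE p + 1 : ℕ) : ℤ) by push_cast; ring,
      show ((2:ℤ) ^ (p + 1) + 1) = ((pvE p + 1 + (2 ^ (p + 1) - pvE p) : ℕ) : ℤ) by
        rw [show (pvE p + 1 + (2 ^ (p + 1) - pvE p) : ℕ) = 2 ^ (p + 1) + 1 from by omega]
        push_cast; ring]
    rw [show ((pvRef (pvE p)).1, (pvRef (pvE p)).2) = pvRef (pvE p) from rfl]
    rw [pvA_inner_fold (p + 1) (2 ^ (p + 1) - pvE p) (pvE p) (by omega), hE]
    rw [show pvE (p + 1) = 2 ^ (p + 1) from by simp [pvE]]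
    simp only [Prod.mk.injEq]
    refine ⟨trivial, trivial, trivial, ?_⟩
    omega

-- B's loop follows the reference run, carrying the lifted root
lemma pvB_fold (cnt : ℕ) :
    (PySem.List.pyRange 1 ((cnt : ℤ) + 1) 1).foldl pvBstep ([], 0, 5)
      = ((pvRef cnt).1, (pvRef cnt).2, pvX cnt) := by
  induction cnt with
  | zero =>
    rw [PySem.List.pyRange_one_eq_nil (by omega)]
    simp [pvRef, pvX]
  | succ cnt ih =>
    rw [show ((cnt + 1 : ℕ) : ℤ) + 1 = (((cnt : ℤ) + 1) + 1) by push_cast; ring,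
      PySem.List.pyRange_one_succ_right (by omega), List.foldl_append, ih]
    simp only [List.foldl]
    have h1 : ((cnt : ℤ) + 1).toNat = cnt + 1 := by omega
    have h2 : ((cnt : ℤ) + 1 + 1).toNat = cnt + 2 := by omega
    have hx : PySem.Int.mod (pvX cnt * pvX cnt) (10 ^ (cnt + 2)) = pvX (cnt + 1) := by
      rw [pv_fmod_eq _ _ (by positivity)]; rfl
    simp only [pvBstep, h1, h2, hx]
    simp only [pvRef, pvEmit]

lemma pv_main (power : Int) : automorphic_numbers power = automorphic_numbers_alt power := by
  by_cases hp : power < 1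
  · simp only [automorphic_numbers, automorphic_numbers_alt, if_pos hp]
    rw [PySem.List.pyRange_one_eq_nil (by omega)]
    rfl
  · have h0 : 0 ≤ power := by omega
    obtain ⟨p, rfl⟩ : ∃ p : ℕ, power = (p : ℤ) := ⟨power.toNat, by omega⟩
    have hp1 : 1 ≤ p := by omega
    simp only [automorphic_numbers, automorphic_numbers_alt, Int.toNat_natCast]
    rw [if_neg hp]
    rw [pvA_outer_fold p]
    rw [show ((2:ℤ) ^ p + 1) = (((2 ^ p : ℕ) : ℤ) + 1) by push_cast; ring]
    rw [pvB_fold (2 ^ p)]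
    rw [show pvE p = 2 ^ p from by simp only [pvE, if_neg (by omega : ¬ p = 0)]]

-- ===== VERDICT (by name: the statement is the Claim_ definition above) =====
theorem automorphic_numbers_spec : Claim_equal_automorphic_numbers := by
  intro power _
  unfold Spec_automorphic_numbers
  exact pv_main power
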